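-- pv_equiv track=rewrite | github.com/ZhangSteven/reconciliation_helper | greenblue.py | filter_greenblue
-- ===== SOURCE A (Python) =====
-- def filter_greenblue(file_list):
-- 	"""
-- 	There are 6 files daily for Green Blue fund:
--
-- 	2 files (Cash Stt, Holding) from BOCHK
--
-- 	2 CCB China cash files for account 13000, 33000
--
-- 	2 CCB China position files for account 13000, 33000
--
-- 	The function filter them separately and return 3 lists to represent
-- 	them.
-- 	"""
-- 	bochk_files = []
-- 	CCB_cash_files = []
-- 	CCB_position_files = []
--
-- 	for filename in file_list:
-- 		filename_no_path = filename.split('\\')[-1]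
-- 		if filename_no_path.startswith('Cash Stt') \
-- 			or filename_no_path.startswith('Holding'):
-- 			bochk_files.append(filename)
--
-- 		elif filename_no_path.startswith('Cash Position'):
-- 			CCB_cash_files.append(filename)
--
-- 		elif filename_no_path.startswith('Security Holdings'):
-- 			CCB_position_files.append(filename)
--
-- 	return bochk_files, CCB_cash_files, CCB_position_files
-- ===== SOURCE B (Python) =====
-- def filter_greenblue(file_list):
--     def stripped(filename):
--         return filename.split('\\')[-1]
--     bochk_files = [f for f in file_list
--                    if stripped(f).startswith('Cash Stt') or stripped(f).startswith('Holding')]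
--     CCB_cash_files = [f for f in file_list if stripped(f).startswith('Cash Position')]
--     CCB_position_files = [f for f in file_list if stripped(f).startswith('Security Holdings')]
--     return bochk_files, CCB_cash_files, CCB_position_files
-- ===== Notes on version B (the rewrite author's own statement) =====
-- stated objective: idiomatic
-- what changed: Replaces the single stateful loop with an elif chain and three mutable accumulators by three independent list comprehensions, one per bucket, relying on the prefixes being mutually exclusive so the elif priority can be dropped.
import Mathlib
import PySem

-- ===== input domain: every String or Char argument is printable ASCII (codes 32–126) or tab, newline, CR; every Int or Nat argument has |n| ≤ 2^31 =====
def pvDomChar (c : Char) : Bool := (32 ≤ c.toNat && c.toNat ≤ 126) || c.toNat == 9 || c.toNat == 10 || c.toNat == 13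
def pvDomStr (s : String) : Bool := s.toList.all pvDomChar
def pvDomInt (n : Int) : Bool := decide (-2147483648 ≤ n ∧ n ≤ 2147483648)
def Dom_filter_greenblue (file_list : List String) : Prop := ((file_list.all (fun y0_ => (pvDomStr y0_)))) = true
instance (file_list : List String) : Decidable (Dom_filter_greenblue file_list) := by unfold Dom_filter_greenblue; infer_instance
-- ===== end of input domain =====

-- B replaces A's single elif-chain loop over three mutable accumulators by three independent
-- comprehensions (filters), one per bucket; idiomatic, same O(n) cost.

-- filename.split('\\')[-1]; split? is some (sep ≠ "") and always nonempty, so pyGet? (-1) is exact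
-- (the .getD defaults are never reached).
def stripName (filename : String) : String :=
  (PySem.List.pyGet? ((PySem.Str.split? filename "\\").getD []) (-1)).getD ""

-- ===== PORT A =====
def filter_greenblue (file_list : List String) : List String × List String × List String :=
  file_list.foldl
    (fun (acc : List String × List String × List String) filename =>
      let filename_no_path := stripName filename
      if PySem.Str.startswith filename_no_path "Cash Stt"
          || PySem.Str.startswith filename_no_path "Holding" then
        (acc.1 ++ [filename], acc.2.1, acc.2.2)
      else if PySem.Str.startswith filename_no_path "Cash Position" then
        (acc.1, acc.2.1 ++ [filename], acc.2.2)
      else if PySem.Str.startswith filename_no_path "Security Holdings" then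
        (acc.1, acc.2.1, acc.2.2 ++ [filename])
      else acc)
    ([], [], [])

-- ===== PORT B =====
def filter_greenblue_alt (file_list : List String) : List String × List String × List String :=
  (file_list.filter (fun f =>
      PySem.Str.startswith (stripName f) "Cash Stt" || PySem.Str.startswith (stripName f) "Holding"),
   file_list.filter (fun f => PySem.Str.startswith (stripName f) "Cash Position"),
   file_list.filter (fun f => PySem.Str.startswith (stripName f) "Security Holdings"))

-- ===== PRECONDITION & SPEC =====
def Spec_filter_greenblue (file_list : List String) (out : List String × List String × List String) : Prop := out = filter_greenblue_alt file_list
instance (file_list : List String) (out : List String × List String × List String) : Decidable (Spec_filter_greenblue file_list out) := by unfold Spec_filter_greenblue; infer_instance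

-- ===== CLAIM (what is proved, stated in full; the proofs are below) =====
def Claim_equal_filter_greenblue : Prop := ∀ (file_list : List String), Dom_filter_greenblue file_list → Spec_filter_greenblue file_list (filter_greenblue file_list)

-- ===== LEMMAS AND PROOFS =====

-- two incomparable prefixes cannot both be prefixes of s
theorem sw_excl (s p q : String)
    (hinc : ¬ (p.toList <+: q.toList ∨ q.toList <+: p.toList))
    (hp : PySem.Str.startswith s p = true) :
    PySem.Str.startswith s q = false := by
  by_contra h
  have hq : PySem.Str.startswith s q = true := by
    cases hq' : PySem.Str.startswith s q with
    | true => rfl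
    | false => exact absurd hq' h
  rw [PySem.Str.startswith_eq, PySem.Chars.startswith_iff] at hp hq
  exact hinc (List.prefix_or_prefix_of_prefix hp hq)

theorem bucket_invariant (l : List String) (b c p : List String) :
    l.foldl
      (fun (acc : List String × List String × List String) filename =>
        let filename_no_path := stripName filename
        if PySem.Str.startswith filename_no_path "Cash Stt"
            || PySem.Str.startswith filename_no_path "Holding" then
          (acc.1 ++ [filename], acc.2.1, acc.2.2)
        else if PySem.Str.startswith filename_no_path "Cash Position" then
          (acc.1, acc.2.1 ++ [filename], acc.2.2)
        else if PySem.Str.startswith filename_no_path "Security Holdings" then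
          (acc.1, acc.2.1, acc.2.2 ++ [filename])
        else acc)
      (b, c, p)
    = (b ++ l.filter (fun f =>
          PySem.Str.startswith (stripName f) "Cash Stt" || PySem.Str.startswith (stripName f) "Holding"),
       c ++ l.filter (fun f => PySem.Str.startswith (stripName f) "Cash Position"),
       p ++ l.filter (fun f => PySem.Str.startswith (stripName f) "Security Holdings")) := by
  induction l generalizing b c p with
  | nil => simp
  | cons x xs ih =>
    have hCS : ¬ ("Cash Stt".toList <+: "Cash Position".toList ∨ "Cash Position".toList <+: "Cash Stt".toList) := by decide
    have hH : ¬ ("Holding".toList <+: "Cash Position".toList ∨ "Cash Position".toList <+: "Holding".toList) := by decide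
    have hCS2 : ¬ ("Cash Stt".toList <+: "Security Holdings".toList ∨ "Security Holdings".toList <+: "Cash Stt".toList) := by decide
    have hH2 : ¬ ("Holding".toList <+: "Security Holdings".toList ∨ "Security Holdings".toList <+: "Holding".toList) := by decide
    have hCP : ¬ ("Cash Position".toList <+: "Security Holdings".toList ∨ "Security Holdings".toList <+: "Cash Position".toList) := by decide
    simp only [List.foldl_cons, List.filter_cons]
    by_cases h1 : (PySem.Str.startswith (stripName x) "Cash Stt"
        || PySem.Str.startswith (stripName x) "Holding") = true
    · have hcp : PySem.Str.startswith (stripName x) "Cash Position" = false := by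
        rcases Bool.or_eq_true_iff.mp h1 with h | h
        · exact sw_excl _ _ _ hCS h
        · exact sw_excl _ _ _ hH h
      have hsh : PySem.Str.startswith (stripName x) "Security Holdings" = false := by
        rcases Bool.or_eq_true_iff.mp h1 with h | h
        · exact sw_excl _ _ _ hCS2 h
        · exact sw_excl _ _ _ hH2 h
      simp only [h1, hcp, hsh, if_true, if_false, Bool.false_eq_true]
      rw [ih]
      simp
    · by_cases h2 : PySem.Str.startswith (stripName x) "Cash Position" = true
      · have hsh : PySem.Str.startswith (stripName x) "Security Holdings" = false :=
          sw_excl _ _ _ hCP h2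
        simp only [h1, h2, hsh, if_true, if_false, Bool.false_eq_true]
        rw [ih]
        simp
      · by_cases h3 : PySem.Str.startswith (stripName x) "Security Holdings" = true
        · simp only [h1, h2, h3, if_true, if_false, Bool.false_eq_true]
          rw [ih]
          simp
        · simp only [h1, h2, h3, if_false, Bool.false_eq_true]
          rw [ih]

-- ===== VERDICT (by name: the statement is the Claim_ definition above) =====
theorem filter_greenblue_spec : Claim_equal_filter_greenblue := by
  intro fl _
  show filter_greenblue fl = filter_greenblue_alt fl
  unfold filter_greenblue filter_greenblue_alt
  simpa using bucket_invariant fl [] [] []
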